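-- pv_equiv track=rewrite | github.com/bluephoenix5/scrabble-scorer-python | scrabble_scorer.py | vowel_bonus_scorer
-- ===== SOURCE A (Python) =====
-- def vowel_bonus_scorer(word):
--     vowels = "aeiou"
--     score = 0
--     for letter in word.lower():
--         if letter in vowels:
--             score += 3
--         else:
--             score += 1
--
--     return score
-- ===== SOURCE B (Python) =====
-- def vowel_bonus_scorer(word):
--     w = word.lower()
--     return len(w) + 2 * sum(w.count(v) for v in "aeiou")
-- ===== Notes on version B (the rewrite author's own statement) =====
-- stated objective: simpler
-- what changed: Replaces the per-character +3/+1 accumulator loop with the algebraic identity score = len(word) + 2*vowel_count, computed from the length and the per-vowel str.count of the lowercased word.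
import Mathlib
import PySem

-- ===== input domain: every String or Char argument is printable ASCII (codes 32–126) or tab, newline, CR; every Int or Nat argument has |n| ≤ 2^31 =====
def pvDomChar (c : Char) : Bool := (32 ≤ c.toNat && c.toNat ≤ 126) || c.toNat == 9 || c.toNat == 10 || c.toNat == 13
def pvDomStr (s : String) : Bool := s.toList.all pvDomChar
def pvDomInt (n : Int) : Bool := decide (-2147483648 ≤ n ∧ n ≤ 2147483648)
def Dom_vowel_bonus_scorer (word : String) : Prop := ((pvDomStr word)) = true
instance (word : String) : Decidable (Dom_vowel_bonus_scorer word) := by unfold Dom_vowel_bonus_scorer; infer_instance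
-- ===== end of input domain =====

-- B computes the same score as len + 2*vowel_count instead of A's per-character +3/+1 loop (objective: simpler).

-- ===== PORT A =====
def vowel_bonus_scorer (word : String) : Int :=
  (PySem.Str.lower word).toList.foldl
    (fun score letter => if "aeiou".toList.contains letter then score + 3 else score + 1) 0

-- ===== PORT B =====
def vowel_bonus_scorer_alt (word : String) : Int :=
  let w := (PySem.Str.lower word).toList
  (w.length : Int) + 2 * ("aeiou".toList.map (fun v => (w.count v : Int))).sum

-- ===== PRECONDITION & SPEC =====
def Spec_vowel_bonus_scorer (word : String) (out : Int) : Prop := out = vowel_bonus_scorer_alt word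
instance (word : String) (out : Int) : Decidable (Spec_vowel_bonus_scorer word out) := by unfold Spec_vowel_bonus_scorer; infer_instance

-- ===== CLAIM (what is proved, stated in full; the proofs are below) =====
def Claim_equal_vowel_bonus_scorer : Prop := ∀ (word : String), Dom_vowel_bonus_scorer word → Spec_vowel_bonus_scorer word (vowel_bonus_scorer word)

-- ===== LEMMAS AND PROOFS =====

theorem vbs_foldl (l : List Char) (a : Int) :
    l.foldl (fun score letter => if "aeiou".toList.contains letter then score + 3 else score + 1) a
      = a + l.length + 2 * l.countP (fun c => "aeiou".toList.contains c) := by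
  induction l generalizing a with
  | nil => simp
  | cons c l ih =>
    simp only [List.foldl_cons, List.countP_cons, ih, List.length_cons]
    split_ifs with h <;> simp <;> ring

theorem vbs_sum_counts (l : List Char) :
    ("aeiou".toList.map (fun v => (l.count v : Int))).sum
      = (l.countP (fun c => "aeiou".toList.contains c) : Int) := by
  induction l with
  | nil => simp
  | cons c l ih =>
    simp only [List.count_cons, List.countP_cons] at *
    by_cases ha : c = 'a' <;> by_cases he : c = 'e' <;> by_cases hi : c = 'i' <;>
      by_cases ho : c = 'o' <;> by_cases hu : c = 'u' <;>
      simp_all <;> omega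

-- ===== VERDICT (by name: the statement is the Claim_ definition above) =====
theorem vowel_bonus_scorer_spec : Claim_equal_vowel_bonus_scorer := by
  intro word _
  simp only [Spec_vowel_bonus_scorer, vowel_bonus_scorer, vowel_bonus_scorer_alt]
  rw [vbs_foldl, vbs_sum_counts]
  push_cast
  ring
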